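-- pv_equiv track=rewrite | github.com/theurs/tb1 | my_openrouter.py | format_models_for_telegram
-- ===== SOURCE A (Python) =====
-- from typing import Any, Dict, List, Optional
--
-- def format_models_for_telegram(models: List[str]) -> str:
--     """
--     Categorizes, sorts, and formats a list of models for display in Telegram using Markdown.
--     Handles models with prefixes and numeric components for better organization.
--
--     Args:
--         models: A list of model names.
--
--     Returns:
--         A formatted string ready for Telegram.
--     """
--
--     categories: Dict[str, List[str]] = {}
--     for model in models:
--         parts = model.split('-')  # Splitting by '-' to account for prefixes. Customize if needed
--         prefix = parts[0] if parts else "Other" # Main category based on the prefix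
--         if prefix not in categories:
--             categories[prefix] = []
--         categories[prefix].append(model)
--
--     output = ""
--     sorted_categories = sorted(categories.keys())
--
--     def _sort_key(model: str):
--         parts = []
--         for part in model.split('-'):
--             if part.isdigit():
--                 parts.append(part.zfill(4))  # Pad with zeros to a fixed width (e.g., 4)
--             elif part.replace('.', '', 1).isdigit():
--                 parts.append(part)  # floats are okay to be compared as strings
--             else:
--                 parts.append(part)
--         return tuple(parts)
--
--     for category in sorted_categories:
--         output += f"**{category}:**\n"  # Bold category header
--         sorted_models = sorted(categories[category], key=lambda x: _sort_key(x)) # Sorting models intelligently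
--         output += "\n".join([f"- `{model}`" for model in sorted_models]) + "\n\n"
--
--     return output
-- ===== SOURCE B (Python) =====
-- def format_models_for_telegram(models):
--     """Set-of-prefixes + per-category filter over precomputed (prefix, model)
--     pairs: no dict-of-lists is ever built."""
--
--     def _sort_key(model):
--         parts = []
--         for part in model.split('-'):
--             if part.isdigit():
--                 parts.append(part.zfill(4))
--             else:
--                 parts.append(part)
--         return tuple(parts)
--
--     pairs = [(m.split('-')[0], m) for m in models]
--     output = ""
--     for prefix in sorted({p for p, _ in pairs}):
--         group = sorted([m for p, m in pairs if p == prefix], key=_sort_key)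
--         output += ("**%s:**\n" % prefix
--                    + "\n".join("- `%s`" % m for m in group)
--                    + "\n\n")
--     return output
-- ===== Notes on version B (the rewrite author's own statement) =====
-- stated objective: simpler
-- what changed: B never builds A's dict-of-lists: it precomputes (prefix, model) pairs, sorts the set of prefixes once and, per category, filters the pair list and sorts that group, concatenating the blocks directly.
import Mathlib
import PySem

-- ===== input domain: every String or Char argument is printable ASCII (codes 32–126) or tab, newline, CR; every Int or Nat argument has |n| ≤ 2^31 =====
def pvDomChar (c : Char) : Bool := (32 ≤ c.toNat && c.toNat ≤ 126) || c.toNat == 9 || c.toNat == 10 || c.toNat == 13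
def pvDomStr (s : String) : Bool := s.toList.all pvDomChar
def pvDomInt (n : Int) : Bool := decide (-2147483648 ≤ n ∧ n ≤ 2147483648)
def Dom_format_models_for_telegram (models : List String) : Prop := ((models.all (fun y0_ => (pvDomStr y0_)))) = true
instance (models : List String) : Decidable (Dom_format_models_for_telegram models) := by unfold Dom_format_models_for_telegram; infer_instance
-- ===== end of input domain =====

-- B replaces A's dict-of-lists grouping by a sorted set of prefixes with a per-category
-- filter over precomputed (prefix, model) pairs (objective: simpler — no dict is ever
-- built; B trades an extra pass over the list per category for that).

-- ===== PORT A =====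
-- model.split('-')  (sep is the literal "-", never empty, so split? always returns a value)
def pvParts (m : String) : List String := (PySem.Str.split? m "-").getD []

-- parts[0] if parts else "Other"
def pvPrefA (m : String) : String :=
  match pvParts m with
  | [] => "Other"
  | p :: _ => p

-- part.replace('.', '', 1)  (replace with count=1; ported by hand — exact: drops the first '.')
def pvRemoveDotOnce : List Char → List Char
  | [] => []
  | c :: rest => if c = '.' then rest else c :: pvRemoveDotOnce rest

-- the body of A's _sort_key loop for one part (the elif and else branches both yield part)
def pvSortPartA (part : String) : String :=
  if PySem.Str.strIsdigit part then PySem.Str.zfill part 4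
  else if PySem.Chars.strIsdigit (pvRemoveDotOnce part.toList) then part
  else part

-- _sort_key(model): the tuple of transformed parts, as a List String (Python tuple-of-str order = lex order)
def pvSortKeyA (m : String) : List String := (pvParts m).map pvSortPartA

-- the 'categories' dict A builds in its first loop (local variable lifted to a helper)
def pvCategories (models : List String) : PySem.Dict String (List String) :=
  models.foldl
    (fun d model =>
      let pfx := pvPrefA model
      (if d.contains pfx then d else d.insert pfx ([] : List String)).modify pfx []
        (fun v => v ++ [model]))
    (PySem.Dict.mk [])

def format_models_for_telegram (models : List String) : String :=
  (PySem.List.sorted (pvCategories models).keys (fun k => k)).foldl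
    (fun output category =>
      output ++ ("**" ++ category ++ ":**\n"
        ++ PySem.Str.join "\n"
            ((PySem.List.sorted ((pvCategories models).getD category []) pvSortKeyA).map
              (fun m => "- `" ++ m ++ "`"))
        ++ "\n\n")) ""

-- ===== PORT B =====
-- m.split('-')[0]
def pvPrefB (m : String) : String := (PySem.List.pyGet? (pvParts m) 0).getD ""

-- B's _sort_key loop body (no dead elif)
def pvSortPartB (part : String) : String :=
  if PySem.Str.strIsdigit part then PySem.Str.zfill part 4 else part

def pvSortKeyB (m : String) : List String := (pvParts m).map pvSortPartB

-- pairs = [(m.split('-')[0], m) for m in models]  (local variable lifted to a helper)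
def pvPairs (models : List String) : List (String × String) :=
  models.map (fun m => (pvPrefB m, m))

def format_models_for_telegram_alt (models : List String) : String :=
  (PySem.List.sorted (PySem.Set.ofList ((pvPairs models).map (fun q => q.1))) (fun k => k)).foldl
    (fun output p =>
      output ++ ("**" ++ p ++ ":**\n"
        ++ PySem.Str.join "\n"
            ((PySem.List.sorted (((pvPairs models).filter (fun q => q.1 == p)).map (fun q => q.2))
                pvSortKeyB).map
              (fun m => "- `" ++ m ++ "`"))
        ++ "\n\n")) ""

-- ===== PRECONDITION & SPEC =====
def Spec_format_models_for_telegram (models : List String) (out : String) : Prop := out = format_models_for_telegram_alt models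
instance (models : List String) (out : String) : Decidable (Spec_format_models_for_telegram models out) := by unfold Spec_format_models_for_telegram; infer_instance

-- ===== CLAIM (what is proved, stated in full; the proofs are below) =====
def Claim_equal_format_models_for_telegram : Prop := ∀ (models : List String), Dom_format_models_for_telegram models → Spec_format_models_for_telegram models (format_models_for_telegram models)

-- ===== LEMMAS AND PROOFS =====

-- splitOn never returns the empty list: every terminal case of go conses onto acc
theorem pv_splitOn_go_ne_nil (sep : List Char) (fuel : Nat) (l cur : List Char)
    (acc : List (List Char)) : PySem.Chars.splitOn.go sep fuel l cur acc ≠ [] := by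
  induction fuel generalizing l cur acc with
  | zero => simp [PySem.Chars.splitOn.go]
  | succ fuel ih =>
    cases l with
    | nil => simp [PySem.Chars.splitOn.go]
    | cons c rest =>
      rw [PySem.Chars.splitOn.go]
      split
      · exact ih _ _ _
      · exact ih _ _ _

theorem pvParts_ne_nil (m : String) : pvParts m ≠ [] := by
  have h : pvParts m
      = (PySem.Chars.splitOn.go "-".toList (m.toList.length + 1) m.toList [] []).map
          String.ofList := rfl
  rw [h]
  simp only [ne_eq, List.map_eq_nil_iff]
  exact pv_splitOn_go_ne_nil _ _ _ _ _

theorem pvPrefB_eq : pvPrefB = pvPrefA := by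
  funext m
  unfold pvPrefB pvPrefA
  cases h : pvParts m with
  | nil => exact absurd h (pvParts_ne_nil m)
  | cons p t => simp [PySem.List.pyGet?, PySem.List.pyIdx?]

theorem pvSortKeyB_eq : pvSortKeyB = pvSortKeyA := by
  funext m
  unfold pvSortKeyB pvSortKeyA
  refine List.map_congr_left (fun part _ => ?_)
  unfold pvSortPartB pvSortPartA
  split_ifs <;> rfl

-- A's "if pfx not in d: d[pfx] = []; d[pfx].append(model)" is one modify
theorem pv_dict_step (d : PySem.Dict String (List String)) (k : String) (m : String) :
    (if d.contains k then d else d.insert k ([] : List String)).modify k []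
      (fun v => v ++ [m]) = d.modify k [] (fun v => v ++ [m]) := by
  by_cases h : d.contains k
  · rw [if_pos h]
  · rw [if_neg h]
    unfold PySem.Dict.modify
    rw [PySem.Dict.getD_insert_self, PySem.Dict.insert_insert_self,
        PySem.Dict.getD_of_not_contains _ _ (by simpa using h)]

-- the grouped dict looks up to a filter of the input
theorem pv_getD_group (models : List String) (c : String) :
    ((models.foldl (fun d model => d.modify (pvPrefA model) [] (fun v => v ++ [model]))
        (PySem.Dict.mk [])).getD c []) = models.filter (fun m => pvPrefA m == c) := by
  have h := PySem.Dict.getD_foldl_modify_append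
    (models.map (fun m => (pvPrefA m, m))) (PySem.Dict.mk ([] : List (String × List String))) c
  rw [List.foldl_map] at h
  simpa [List.filter_map, Function.comp_def, List.map_map] using h

theorem pvCategories_eq (models : List String) :
    pvCategories models
      = models.foldl (fun d model => d.modify (pvPrefA model) [] (fun v => v ++ [model]))
          (PySem.Dict.mk []) :=
  PySem.List.foldl_congr_mem models _ _ _ (fun acc x _ => pv_dict_step acc (pvPrefA x) x)

theorem pv_keys_group (models : List String) :
    (pvCategories models).keys = PySem.Set.ofList (models.map pvPrefA) := by
  rw [pvCategories_eq]
  exact PySem.Dict.keys_foldl_modify_key models pvPrefA ([] : List String)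
    (fun _ model => (fun v => v ++ [model])) (PySem.Dict.mk [])

theorem pv_getD_cat (models : List String) (c : String) :
    (pvCategories models).getD c [] = models.filter (fun m => pvPrefA m == c) := by
  rw [pvCategories_eq]
  exact pv_getD_group models c

-- ===== VERDICT (by name: the statement is the Claim_ definition above) =====
theorem pv_pairs_eq (models : List String) :
    pvPairs models = models.map (fun m => (pvPrefA m, m)) := by
  unfold pvPairs; rw [pvPrefB_eq]

theorem pv_fst_pairs (models : List String) :
    (pvPairs models).map (fun q => q.1) = models.map pvPrefA := by
  rw [pv_pairs_eq]; simp [List.map_map, Function.comp_def]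

theorem pv_group_pairs (models : List String) (c : String) :
    ((pvPairs models).filter (fun q => q.1 == c)).map (fun q => q.2)
      = models.filter (fun m => pvPrefA m == c) := by
  rw [pv_pairs_eq]
  simp [List.filter_map, Function.comp_def, List.map_map]

theorem format_models_for_telegram_spec : Claim_equal_format_models_for_telegram := by
  intro models _
  unfold Spec_format_models_for_telegram format_models_for_telegram format_models_for_telegram_alt
  rw [pvSortKeyB_eq, pv_keys_group, pv_fst_pairs]
  exact PySem.List.foldl_congr_mem _ _ _ _
    (fun acc c _ => by rw [pv_getD_cat, ← pv_group_pairs])
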